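-- pv_equiv track=rewrite | github.com/PrVrSs/AntlrGrammarFuzzer | generator/rule.py | concatenate_expr
-- ===== SOURCE A (Python) =====
-- def concatenate_expr(tree_: list) -> list:
--     pop_list = []
--     for index, expr in enumerate(tree_):
--         try:
--             if expr == '(':
--                 if index != 0:
--                     tree_[index - 1] = tree_[index - 1] + expr
--                     pop_list.append(index)
--         except IndexError:
--             pass
--     count_pop = 0
--     for i in pop_list:
--         tree_.pop(i - count_pop)
--         count_pop += 1
--     return tree_
-- ===== SOURCE B (Python) =====
-- def concatenate_expr(tree_: list) -> list:
--     # Single forward pass with lookahead; mutates tree_ in place via slice assignment, like A.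
--     n = len(tree_)
--     result = []
--     for j in range(n):
--         if tree_[j] == '(' and j != 0:
--             continue
--         if j + 1 < n and tree_[j + 1] == '(':
--             result.append(tree_[j] + '(')
--         else:
--             result.append(tree_[j])
--     tree_[:] = result
--     return tree_
-- ===== Notes on version B (the rewrite author's own statement) =====
-- stated objective: simpler
-- what changed: Replaces A's two-phase mutate-then-pop (append '(' to the predecessor in place, record indices, then pop them with a shifting offset) by a single forward pass with one-token lookahead that builds the output list directly.
import Mathlib
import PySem

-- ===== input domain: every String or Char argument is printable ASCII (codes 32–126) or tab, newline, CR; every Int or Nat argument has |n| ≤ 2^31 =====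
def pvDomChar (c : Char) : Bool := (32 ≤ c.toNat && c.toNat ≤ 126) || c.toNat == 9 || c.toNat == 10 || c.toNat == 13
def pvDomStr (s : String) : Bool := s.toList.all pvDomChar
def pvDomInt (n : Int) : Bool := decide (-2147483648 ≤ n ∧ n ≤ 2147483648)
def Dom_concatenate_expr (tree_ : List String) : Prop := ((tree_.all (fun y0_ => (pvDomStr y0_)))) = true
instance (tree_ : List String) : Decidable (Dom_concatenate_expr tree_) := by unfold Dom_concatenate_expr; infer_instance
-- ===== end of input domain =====

-- B replaces A's in-place merge-then-pop by a single forward lookahead pass (simpler);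
-- both Pythons mutate tree_ in place the same way (A by element assignment + pop, B by
-- slice assignment) and return the same object, so the return-value equivalence proved
-- here covers the observable behaviour.

-- ===== PORT A =====
-- first loop: `for index, expr in enumerate(tree_)` with live in-place mutation;
-- every index read/written is in range, so List.getD (dummy default) / List.set are exact.
-- The try/except IndexError is unreachable (index-1 ≥ 0 under the index != 0 guard) and is
-- therefore not ported.
def pvALoop1 : List Nat → List String × List Nat → List String × List Nat
  | [], st => st
  | i :: rest, (t, pops) =>
      let expr := t.getD i ""
      if expr = "(" then
        if i ≠ 0 then
          pvALoop1 rest (t.set (i - 1) (t.getD (i - 1) "" ++ expr), pops ++ [i])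
        else pvALoop1 rest (t, pops)
      else pvALoop1 rest (t, pops)

-- second loop: `tree_.pop(i - count_pop)`; the index is always in range, so eraseIdx is exact.
def pvALoop2 : List Nat → Nat → List String → List String
  | [], _, t => t
  | i :: rest, c, t => pvALoop2 rest (c + 1) (t.eraseIdx (i - c))

def concatenate_expr (tree_ : List String) : List String :=
  let st := pvALoop1 (List.range tree_.length) (tree_, [])
  pvALoop2 st.2 0 st.1

-- ===== PORT B =====
-- single forward pass over range(n) with one-token lookahead; reads only the original list.
def pvBLoop (t : List String) : List Nat → List String
  | [] => []
  | j :: rest =>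
      if t.getD j "" = "(" ∧ j ≠ 0 then pvBLoop t rest
      else (if j + 1 < t.length ∧ t.getD (j + 1) "" = "(" then t.getD j "" ++ "("
            else t.getD j "") :: pvBLoop t rest

def concatenate_expr_alt (tree_ : List String) : List String :=
  pvBLoop tree_ (List.range tree_.length)

-- ===== PRECONDITION & SPEC =====
def Spec_concatenate_expr (tree_ : List String) (out : List String) : Prop := out = concatenate_expr_alt tree_
instance (tree_ : List String) (out : List String) : Decidable (Spec_concatenate_expr tree_ out) := by unfold Spec_concatenate_expr; infer_instance

-- ===== CLAIM (what is proved, stated in full; the proofs are below) =====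
def Claim_equal_concatenate_expr : Prop := ∀ (tree_ : List String), Dom_concatenate_expr tree_ → Spec_concatenate_expr tree_ (concatenate_expr tree_)

-- ===== LEMMAS AND PROOFS =====

-- the merged value every surviving slot ends up with (reads only the original list)
def pvG (orig : List String) (k : Nat) : String :=
  if orig.getD (k + 1) "" = "(" then orig.getD k "" ++ "(" else orig.getD k ""

-- the pop predicate: the element is "(" at a non-initial position
def pvQ (orig : List String) (k : Nat) : Bool :=
  decide (orig.getD k "" = "(" ∧ k ≠ 0)

lemma pv_set_at_length (pre l : List String) (x v : String) :
    (pre ++ x :: l).set pre.length v = pre ++ v :: l := by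
  induction pre with
  | nil => rfl
  | cons a as ih => simp [ih]

lemma pv_erase_at_length (pre l : List String) (x : String) :
    (pre ++ x :: l).eraseIdx pre.length = pre ++ l := by
  induction pre with
  | nil => rfl
  | cons a as ih => simp [ih]

lemma pvBLoop_eq (t : List String) : ∀ L : List Nat,
    pvBLoop t L = (L.filter (fun j => !pvQ t j)).map (pvG t) := by
  intro L
  induction L with
  | nil => rfl
  | cons j rest ih =>
    rw [pvBLoop, List.filter_cons]
    by_cases h : t.getD j "" = "(" ∧ j ≠ 0
    · have hq : pvQ t j = true := by rw [pvQ]; exact decide_eq_true h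
      rw [if_pos h, ih, hq]
      rfl
    · have hq : pvQ t j = false := by simp only [pvQ, decide_eq_false_iff_not]; exact h
      rw [if_neg h, ih, hq]
      simp only [Bool.not_false, if_pos, List.map_cons]
      congr 1
      by_cases hg : t.getD (j + 1) "" = "("
      · have hlt : j + 1 < t.length := by
          by_contra hlt
          rw [List.getD_eq_default _ _ (by omega)] at hg
          simp at hg
        rw [if_pos ⟨hlt, hg⟩, pvG, if_pos hg]
      · rw [if_neg (by intro hc; exact hg hc.2), pvG, if_neg hg]

lemma pv_getD_pre_drop (orig pre : List String) (i k : Nat) (hl : pre.length = i)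
    (hk : i ≤ k) : (pre ++ orig.drop i).getD k "" = orig.getD k "" := by
  rw [List.getD_eq_getElem?_getD, List.getD_eq_getElem?_getD,
    List.getElem?_append_right (by omega), List.getElem?_drop]
  congr 2
  omega

lemma pvALoop1_spec (orig : List String) : ∀ (m j : Nat) (t : List String) (ps : List Nat),
    j + m = orig.length →
    t = (List.range (j - 1)).map (pvG orig) ++ orig.drop (j - 1) →
    pvALoop1 (List.range' j m) (t, ps) =
      ((List.range (orig.length - 1)).map (pvG orig) ++ orig.drop (orig.length - 1),
       ps ++ (List.range' j m).filter (pvQ orig)) := by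
  intro m
  induction m with
  | zero =>
    intro j t ps hjm ht
    have hj : j = orig.length := by omega
    subst hj
    simp [pvALoop1, ht]
  | succ m ih =>
    intro j t ps hjm ht
    have hjn : j < orig.length := by omega
    have hlpre : ((List.range (j - 1)).map (pvG orig)).length = j - 1 := by simp
    have hget : ∀ k, j - 1 ≤ k → t.getD k "" = orig.getD k "" := by
      intro k hk
      rw [ht]; exact pv_getD_pre_drop orig _ _ k hlpre hk
    have hexpr : t.getD j "" = orig.getD j "" := hget j (by omega)
    rw [List.range'_succ, pvALoop1]
    simp only [hexpr]
    by_cases hpar : orig.getD j "" = "("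
    · by_cases hj0 : j = 0
      · -- '(' at position 0: no mutation, no pop
        rw [if_pos hpar, if_neg (by simp [hj0])]
        have hq : pvQ orig j = false := by
          rw [pvQ]; exact decide_eq_false (fun hc => hc.2 hj0)
        rw [List.filter_cons, hq]
        simp only [Bool.false_eq_true, if_neg (by simp : ¬False)]
        refine ih (j + 1) t ps (by omega) ?_
        subst hj0
        simpa using ht
      · -- '(' at j ≥ 1: predecessor absorbs it, j is recorded for popping
        rw [if_pos hpar, if_pos hj0]
        have hj1 : j - 1 + 1 = j := by omega
        have hlt : j - 1 < orig.length := by omega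
        have hdrop : orig.drop (j - 1) = orig.getD (j - 1) "" :: orig.drop j := by
          rw [List.drop_eq_getElem_cons hlt, List.getD_eq_getElem _ "" hlt, hj1]
        have hgetp : t.getD (j - 1) "" = orig.getD (j - 1) "" := hget (j - 1) (by omega)
        have hr := List.range_succ (n := j - 1)
        rw [Nat.succ_eq_add_one, hj1] at hr
        have hgv : pvG orig (j - 1) = orig.getD (j - 1) "" ++ "(" := by
          rw [pvG, hj1, if_pos hpar]
        have hset : t.set (j - 1) (t.getD (j - 1) "" ++ orig.getD j "") =
            (List.range j).map (pvG orig) ++ orig.drop j := by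
          rw [hgetp, hpar, ht, hdrop]
          have hs := pv_set_at_length ((List.range (j - 1)).map (pvG orig)) (orig.drop j)
            (orig.getD (j - 1) "") (orig.getD (j - 1) "" ++ "(")
          rw [hlpre] at hs
          rw [hs, ← hgv, hr, List.map_append]
          simp
        have hq : pvQ orig j = true := by rw [pvQ]; exact decide_eq_true ⟨hpar, hj0⟩
        rw [hset]
        rw [ih (j + 1) _ (ps ++ [j]) (by omega) (by simp)]
        rw [List.filter_cons, hq]
        simp
    · -- not '(': nothing happens at j
      rw [if_neg hpar]
      have hq : pvQ orig j = false := by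
        rw [pvQ]; exact decide_eq_false (fun hc => hpar hc.1)
      rw [List.filter_cons, hq]
      simp only [Bool.false_eq_true, if_neg (by simp : ¬False)]
      refine ih (j + 1) t ps (by omega) ?_
      by_cases hj0 : j = 0
      · subst hj0; simpa using ht
      · have hj1 : j - 1 + 1 = j := by omega
        have hlt : j - 1 < orig.length := by omega
        have hdrop : orig.drop (j - 1) = orig.getD (j - 1) "" :: orig.drop j := by
          rw [List.drop_eq_getElem_cons hlt, List.getD_eq_getElem _ "" hlt, hj1]
        have hgv : pvG orig (j - 1) = orig.getD (j - 1) "" := by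
          rw [pvG, hj1, if_neg hpar]
        have hr := List.range_succ (n := j - 1)
        rw [Nat.succ_eq_add_one, hj1] at hr
        simp only [Nat.add_sub_cancel]
        rw [ht, hdrop, hr, List.map_append]
        simp [hgv]

lemma pvALoop2_spec (g : Nat → String) (q : Nat → Bool) : ∀ (m j c : Nat) (kept : List String),
    c + kept.length = j →
    pvALoop2 ((List.range' j m).filter q) c (kept ++ (List.range' j m).map g) =
      kept ++ ((List.range' j m).filter (fun k => !q k)).map g := by
  intro m
  induction m with
  | zero => intro j c kept h; simp [pvALoop2]
  | succ m ih =>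
    intro j c kept h
    rw [List.range'_succ, List.filter_cons, List.filter_cons, List.map_cons]
    by_cases hq : q j = true
    · rw [if_pos hq, pvALoop2]
      have hjc : j - c = kept.length := by omega
      rw [hjc, pv_erase_at_length]
      have := ih (j + 1) (c + 1) kept (by omega)
      rw [this, hq]
      simp
    · have hq' : q j = false := by simpa using hq
      rw [hq']
      simp only [Bool.false_eq_true, if_neg (by simp : ¬False), Bool.not_false, if_pos,
        List.map_cons]
      have := ih (j + 1) c (kept ++ [g j]) (by simp; omega)
      simpa using this

lemma pv_final_tree (orig : List String) :
    (List.range (orig.length - 1)).map (pvG orig) ++ orig.drop (orig.length - 1) =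
      (List.range orig.length).map (pvG orig) := by
  cases horig : orig.length with
  | zero =>
    have : orig = [] := List.eq_nil_of_length_eq_zero horig
    subst this; rfl
  | succ n =>
    have hlt : n < orig.length := by omega
    have hdrop : orig.drop n = [orig.getD n ""] := by
      rw [List.drop_eq_getElem_cons hlt, List.getD_eq_getElem _ "" hlt]
      have : orig.drop (n + 1) = [] := List.drop_eq_nil_of_le (by omega)
      rw [this]
    have hnot : ¬ (orig.getD (n + 1) "" = "(") := by
      rw [List.getD_eq_default _ _ (by omega)]
      simp
    have hgv : pvG orig n = orig.getD n "" := by rw [pvG, if_neg hnot]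
    simp only [Nat.add_sub_cancel]
    rw [hdrop, List.range_succ, List.map_append, ← hgv]
    simp

-- ===== VERDICT (by name: the statement is the Claim_ definition above) =====
theorem concatenate_expr_spec : Claim_equal_concatenate_expr := by
  intro tree_ _
  unfold Spec_concatenate_expr concatenate_expr concatenate_expr_alt
  rw [pvBLoop_eq, List.range_eq_range']
  have h1 := pvALoop1_spec tree_ tree_.length 0 tree_ [] (by omega) (by simp)
  rw [pv_final_tree] at h1
  rw [h1]
  have h2 := pvALoop2_spec (pvG tree_) (pvQ tree_) tree_.length 0 0 [] (by simp)
  simpa [List.range_eq_range'] using h2
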